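-- pv_equiv track=rewrite | github.com/yuzhang330/simulink-model-generation-and-evolution | test.py | remove_after_third_underscore
-- ===== SOURCE A (Python) =====
-- def remove_after_third_underscore(s):
--     count = 0
--     for i, char in enumerate(s):
--         if char == '_':
--             count += 1
--             if count == 3:
--                 return s[:i]
--     return s
-- ===== SOURCE B (Python) =====
-- def remove_after_third_underscore(s):
--     parts = s.split('_', 3)
--     if len(parts) <= 3:
--         return s
--     return '_'.join(parts[:3])
-- ===== Notes on version B (the rewrite author's own statement) =====
-- stated objective: idiomatic
-- what changed: Replaces the character-by-character counting scan with split('_', 3) and a rejoin of the first three fragments.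
import Mathlib
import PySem

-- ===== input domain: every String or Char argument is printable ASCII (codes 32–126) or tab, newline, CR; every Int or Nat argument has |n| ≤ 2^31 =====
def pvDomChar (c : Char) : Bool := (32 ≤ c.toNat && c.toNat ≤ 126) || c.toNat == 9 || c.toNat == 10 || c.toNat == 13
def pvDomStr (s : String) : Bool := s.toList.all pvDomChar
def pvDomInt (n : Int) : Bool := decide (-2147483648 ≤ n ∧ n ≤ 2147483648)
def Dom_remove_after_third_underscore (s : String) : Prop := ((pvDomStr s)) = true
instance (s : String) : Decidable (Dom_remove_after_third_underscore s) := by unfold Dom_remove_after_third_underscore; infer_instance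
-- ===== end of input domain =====

-- B replaces A's character-by-character counting scan with split('_', 3) and a rejoin of the
-- first three fragments (idiomatic); return values proved equal on all strings.

-- ===== PORT A =====
-- the 'for i, char in enumerate(s)' loop with its running count and early return
def pvALoop (s : String) : List (Int × Char) → Int → String
  | [], _ => s
  | (i, c) :: rest, count =>
    if c = '_' then
      if count + 1 = 3 then String.ofList (PySem.List.slice s.toList none (some i))
      else pvALoop s rest (count + 1)
    else pvALoop s rest count

def remove_after_third_underscore (s : String) : String :=
  pvALoop s (PySem.List.enumerate s.toList) 0

-- ===== PORT B =====
def remove_after_third_underscore_alt (s : String) : String :=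
  match PySem.Str.splitMax? s "_" 3 with
  | none => s   -- unreachable: the separator "_" is nonempty
  | some parts =>
    if parts.length ≤ 3 then s
    else PySem.Str.join "_" (parts.take 3)

-- ===== PRECONDITION & SPEC =====
def Spec_remove_after_third_underscore (s : String) (out : String) : Prop := out = remove_after_third_underscore_alt s
instance (s : String) (out : String) : Decidable (Spec_remove_after_third_underscore s out) := by unfold Spec_remove_after_third_underscore; infer_instance

-- ===== CLAIM (what is proved, stated in full; the proofs are below) =====
def Claim_equal_remove_after_third_underscore : Prop := ∀ (s : String), Dom_remove_after_third_underscore s → Spec_remove_after_third_underscore s (remove_after_third_underscore s)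

-- ===== LEMMAS AND PROOFS =====

-- number of underscores
def pvCountU (cs : List Char) : Nat := cs.countP (· = '_')

-- characters of cs strictly before its n+1-st underscore (keeping the first n underscores)
def pvChop : Nat → List Char → List Char
  | _, [] => []
  | n, c :: rest =>
    if c = '_' then
      match n with
      | 0 => []
      | n + 1 => '_' :: pvChop n rest
    else c :: pvChop n rest

-- apply f to the head of a (nonempty) list of fragments
def pvMapHd (f : List Char → List Char) : List (List Char) → List (List Char)
  | [] => []
  | x :: xs => f x :: xs

-- reference version of split('_', n)
def pvSplitU : Nat → List Char → List (List Char)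
  | _, [] => [[]]
  | 0, l => [l]
  | n + 1, c :: rest =>
    if c = '_' then [] :: pvSplitU n rest
    else pvMapHd (c :: ·) (pvSplitU (n + 1) (rest))

lemma pvSplitU_ne_nil (n : Nat) (cs : List Char) : pvSplitU n cs ≠ [] := by
  cases cs with
  | nil => simp [pvSplitU]
  | cons c rest =>
    cases n with
    | zero => simp [pvSplitU]
    | succ n =>
      simp only [pvSplitU]
      split
      · simp
      · cases h : pvSplitU (n + 1) rest with
        | nil => exact absurd h (pvSplitU_ne_nil _ _)
        | cons x xs => simp [pvMapHd]

lemma go_spec (fuel m : Nat) (l cur : List Char) (acc : List (List Char))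
    (h : l.length ≤ fuel) :
    PySem.Chars.splitOnMax.go ['_'] fuel m l cur acc
      = acc.reverse ++ pvMapHd (cur.reverse ++ ·) (pvSplitU m l) := by
  induction fuel generalizing m l cur acc with
  | zero =>
    have : l = [] := by cases l <;> simp_all
    subst this
    simp [PySem.Chars.splitOnMax.go, pvSplitU, pvMapHd]
  | succ fuel ih =>
    cases l with
    | nil => simp [PySem.Chars.splitOnMax.go, pvSplitU, pvMapHd]
    | cons c rest =>
      by_cases hm : m = 0
      · subst hm
        simp [PySem.Chars.splitOnMax.go, pvSplitU, pvMapHd]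
      · obtain ⟨m', rfl⟩ := Nat.exists_eq_succ_of_ne_zero hm
        by_cases hc : c = '_'
        · subst hc
          have : List.isPrefixOf ['_'] ('_' :: rest) = true := by
            simp [List.isPrefixOf]
          simp only [PySem.Chars.splitOnMax.go, this, if_pos, Nat.succ_ne_zero, if_neg,
            reduceIte, List.drop_succ_cons, List.drop_zero, Nat.add_sub_cancel]
          rw [ih _ _ _ _ (by simpa using Nat.le_of_succ_le_succ h)]
          rcases hps : pvSplitU m' rest with _ | ⟨x, xs⟩ <;> simp [pvSplitU, pvMapHd, hps]
        · have : List.isPrefixOf ['_'] (c :: rest) = false := by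
            simp [List.isPrefixOf]; exact fun h' => hc h'.symm
          simp only [PySem.Chars.splitOnMax.go, this, Bool.false_eq_true, if_neg, hm, reduceIte]
          rw [ih _ _ _ _ (by simpa using Nat.le_of_succ_le_succ h)]
          have hne := pvSplitU_ne_nil (m' + 1) rest
          cases hx : pvSplitU (m' + 1) rest with
          | nil => exact absurd hx hne
          | cons x xs => simp [pvSplitU, hc, hx, pvMapHd]

lemma splitOnMax_eq (cs : List Char) :
    PySem.Chars.splitOnMax cs ['_'] 3 = pvSplitU 3 cs := by
  rw [PySem.Chars.splitOnMax, if_neg (by norm_num)]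
  have h3 : ((3 : Int)).toNat = 3 := rfl
  rw [h3, go_spec _ _ _ _ _ (by omega)]
  cases hx : pvSplitU 3 cs with
  | nil => exact absurd hx (pvSplitU_ne_nil _ _)
  | cons x xs => simp [pvMapHd]

lemma pvSplitU_us (n : Nat) (rest : List Char) :
    pvSplitU (n + 1) ('_' :: rest) = [] :: pvSplitU n rest := by
  simp [pvSplitU]

lemma pvSplitU_nonus (c : Char) (n : Nat) (rest : List Char) (hc : c ≠ '_') :
    pvSplitU (n + 1) (c :: rest) = pvMapHd (c :: ·) (pvSplitU (n + 1) rest) := by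
  simp [pvSplitU, hc]

lemma pvCountU_us (rest : List Char) : pvCountU ('_' :: rest) = pvCountU rest + 1 := by
  simp [pvCountU, List.countP_cons]

lemma pvCountU_nonus (c : Char) (rest : List Char) (hc : c ≠ '_') :
    pvCountU (c :: rest) = pvCountU rest := by
  simp [pvCountU, List.countP_cons, hc]

lemma splitU_length (n : Nat) (cs : List Char) :
    (pvSplitU n cs).length = min (pvCountU cs) n + 1 := by
  induction cs generalizing n with
  | nil => simp [pvSplitU, pvCountU]
  | cons c rest ih =>
    cases n with
    | zero => simp [pvSplitU]
    | succ n =>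
      by_cases hc : c = '_'
      · subst hc
        rw [pvSplitU_us, List.length_cons, ih n, pvCountU_us]
        omega
      · rw [pvSplitU_nonus c n rest hc, pvCountU_nonus c rest hc]
        have hne := pvSplitU_ne_nil (n + 1) rest
        cases hx : pvSplitU (n + 1) rest with
        | nil => exact absurd hx hne
        | cons x xs =>
          have := ih (n + 1); rw [hx] at this
          simpa [pvMapHd] using this

lemma join_take (n : Nat) (cs : List Char) (hn : 1 ≤ n) (h : n ≤ pvCountU cs) :
    PySem.Chars.join ['_'] ((pvSplitU n cs).take n) = pvChop (n - 1) cs := by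
  induction cs generalizing n with
  | nil => simp [pvCountU] at h; omega
  | cons c rest ih =>
    obtain ⟨n', rfl⟩ := Nat.exists_eq_succ_of_ne_zero (by omega : n ≠ 0)
    by_cases hc : c = '_'
    · subst hc
      rw [pvSplitU_us, List.take_succ_cons]
      cases n' with
      | zero => simp [PySem.Chars.join_singleton, pvChop]
      | succ n'' =>
        have hcount : n'' + 1 ≤ pvCountU rest := by
          rw [pvCountU_us] at h; omega
        have hih := ih (n'' + 1) (by omega) hcount
        have hne := pvSplitU_ne_nil (n'' + 1) rest
        cases hx : pvSplitU (n'' + 1) rest with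
        | nil => exact absurd hx hne
        | cons x xs =>
          rw [hx] at hih
          rw [List.take_succ_cons] at hih
          rw [List.take_succ_cons, PySem.Chars.join_cons_cons]
          simp only [Nat.add_sub_cancel] at hih
          rw [hih]
          simp [pvChop]
    · have hcount : n' + 1 ≤ pvCountU rest := by
        rw [pvCountU_nonus c rest hc] at h; exact h
      have hih := ih (n' + 1) (by omega) hcount
      rw [pvSplitU_nonus c n' rest hc]
      have hne := pvSplitU_ne_nil (n' + 1) rest
      cases hx : pvSplitU (n' + 1) rest with
      | nil => exact absurd hx hne
      | cons x xs =>
        rw [hx] at hih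
        simp only [pvMapHd, List.take_succ_cons] at hih ⊢
        cases hxs : xs.take n' with
        | nil =>
          rw [hxs] at hih
          rw [PySem.Chars.join_singleton] at hih
          rw [PySem.Chars.join_singleton]
          simp [pvChop, hc, hih]
        | cons y ys =>
          rw [hxs] at hih
          rw [PySem.Chars.join_cons_cons] at hih
          rw [PySem.Chars.join_cons_cons]
          simp only [List.cons_append, List.append_assoc, List.nil_append] at hih ⊢
          simp [pvChop, hc]
          simpa using hih

lemma A_loop_spec (s : String) (pre cs : List Char) (n : Nat)
    (hs : s.toList = pre ++ cs) (hn1 : 1 ≤ n) (hn3 : n ≤ 3) :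
    pvALoop s (PySem.List.enumerate cs (pre.length : Int)) (3 - (n : Int))
      = if n ≤ pvCountU cs then String.ofList (pre ++ pvChop (n - 1) cs) else s := by
  induction cs generalizing pre n with
  | nil =>
    simp [PySem.List.enumerate, pvALoop, pvCountU]; omega
  | cons c rest ih =>
    rw [PySem.List.enumerate_cons]
    by_cases hc : c = '_'
    · subst hc
      simp only [pvALoop, if_pos rfl]
      by_cases h1 : n = 1
      · subst h1
        simp only [ite_true, if_true, Nat.cast_one]
        rw [if_pos (show (3:Int) - 1 + 1 = 3 by norm_num)]
        rw [PySem.List.slice_to _ (by positivity)]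
        have hpos : 1 ≤ pvCountU ('_' :: rest) := by rw [pvCountU_us]; omega
        rw [if_pos hpos]
        rw [hs]
        simp [pvChop, List.take_left]
      · have hcond : ¬((3 : Int) - (n : Nat) + 1 = 3) := by
          have : n ≠ 1 := h1
          omega
        rw [if_neg hcond]
        have : (3 : Int) - n + 1 = 3 - ((n - 1 : Nat) : Int) := by
          have h2 : 2 ≤ n := by omega
          omega
        rw [this]
        have : (pre.length : Int) + 1 = ((pre ++ ['_']).length : Int) := by simp
        rw [this]
        rw [ih (pre ++ ['_']) (n - 1) (by simpa using hs) (by omega) (by omega)]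
        have hcnt : pvCountU ('_' :: rest) = pvCountU rest + 1 := by
          simp [pvCountU, List.countP_cons]
        simp only [ite_true, if_true]
        obtain ⟨m, rfl⟩ : ∃ m, n = m + 2 := ⟨n - 2, by omega⟩
        simp only [show m + 2 - 1 - 1 = m from by omega, show m + 2 - 1 = m + 1 from by omega]
        by_cases hle : m + 1 ≤ pvCountU rest
        · rw [if_pos hle, if_pos (by omega)]
          simp [pvChop]
        · rw [if_neg hle, if_neg (by omega)]
    · simp only [pvALoop, if_neg hc]
      have : (pre.length : Int) + 1 = ((pre ++ [c]).length : Int) := by simp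
      rw [this]
      rw [ih (pre ++ [c]) n (by simpa using hs) hn1 hn3]
      have hcnt : pvCountU (c :: rest) = pvCountU rest := by
        simp [pvCountU, List.countP_cons, hc]
      rw [hcnt]
      split
      · simp [pvChop, hc]
      · rfl

-- ===== VERDICT (by name: the statement is the Claim_ definition above) =====
theorem remove_after_third_underscore_spec : Claim_equal_remove_after_third_underscore := by
  intro s _
  unfold Spec_remove_after_third_underscore
  unfold remove_after_third_underscore remove_after_third_underscore_alt
  have hA := A_loop_spec s [] s.toList 3 (by simp) (by omega) (by omega)
  simp only [List.length_nil, Nat.cast_zero, List.nil_append] at hA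
  norm_num at hA
  rw [hA]
  rw [PySem.Str.splitMax?]
  rw [show ("_" : String).toList = ['_'] from rfl]
  rw [PySem.Chars.splitMax?, if_neg (show ¬(List.isEmpty ['_'] = true) from by simp)]
  rw [splitOnMax_eq]
  simp only [Option.map_some]
  rw [List.length_map, splitU_length]
  by_cases h : 3 ≤ pvCountU s.toList
  · rw [if_pos h, if_neg (by omega)]
    rw [PySem.Str.join]
    rw [← List.map_take, List.map_map]
    have : (String.toList ∘ String.ofList) = id := by
      funext l; simp
    rw [this, List.map_id]
    rw [show ("_" : String).toList = ['_'] from rfl]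
    rw [join_take 3 s.toList (by omega) h]
  · rw [if_neg h, if_pos (by omega)]
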